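-- pv_equiv track=rewrite | github.com/paveleroshkinweb/algorithms | algorithms/src/problems/quick_search.py | left_binary_search
-- ===== SOURCE A (Python) =====
-- def left_binary_search(arr, target):
--
--     left = 0
--     right = len(arr) - 1
--
--     while left <= right:
--
--         middle = (left + right) // 2
--         element = arr[middle]
--
--         if element >= target:
--             right = middle - 1
--         else:
--             left = middle + 1
--
--     return left
-- ===== SOURCE B (Python) =====
-- def left_binary_search(arr, target):
--     def go(lo, n):
--         # search within the window of n elements starting at index lo
--         if n == 0:
--             return lo
--         k = (n - 1) // 2
--         if arr[lo + k] >= target: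
--             return go(lo, k)
--         return go(lo + k + 1, n - k - 1)
--     return go(0, len(arr))
-- ===== Notes on version B (the rewrite author's own statement) =====
-- stated objective: alternative
-- what changed: Replaced the iterative two-pointer while loop over signed (left, right) bounds with a recursive helper over a (start, length) window of natural numbers: the base case is an empty window and each step recurses on the half-window length instead of updating pointer state.
import Mathlib
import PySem

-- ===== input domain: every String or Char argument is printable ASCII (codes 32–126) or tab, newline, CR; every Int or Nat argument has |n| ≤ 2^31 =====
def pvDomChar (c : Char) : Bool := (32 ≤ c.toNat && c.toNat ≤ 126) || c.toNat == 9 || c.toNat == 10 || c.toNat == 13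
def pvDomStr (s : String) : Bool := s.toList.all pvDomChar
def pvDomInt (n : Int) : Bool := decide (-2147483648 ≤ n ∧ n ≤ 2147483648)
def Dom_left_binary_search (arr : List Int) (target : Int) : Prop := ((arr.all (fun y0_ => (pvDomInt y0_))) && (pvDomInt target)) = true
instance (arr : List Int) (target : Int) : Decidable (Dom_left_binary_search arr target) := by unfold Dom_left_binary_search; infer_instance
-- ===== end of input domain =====

-- B replaces A's iterative two-pointer while loop with a recursive helper over a (start, length) window; alternative decomposition, no speed claim.

-- ===== PORT A =====
-- A's while loop as recursion on the state (left, right); fuel only makes the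
-- recursion structural (the interval shrinks each iteration, so arr.length + 1
-- tests always suffice and the fuel-0 branch is never reached from the top call).
-- The `none` branch is unreachable: the index (left+right)//2 is in range when
-- 0 ≤ left ≤ right < arr.length.
def pvLoopA (arr : List Int) (target : Int) : Nat → Int → Int → Int
  | 0, left, _ => left
  | fuel + 1, left, right =>
    if left ≤ right then
      match PySem.List.pyGet? arr (PySem.Int.floordiv (left + right) 2) with
      | some element =>
          if element ≥ target then
            pvLoopA arr target fuel left (PySem.Int.floordiv (left + right) 2 - 1)
          else
            pvLoopA arr target fuel (PySem.Int.floordiv (left + right) 2 + 1) right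
      | none => left
    else left

def left_binary_search (arr : List Int) (target : Int) : Int :=
  pvLoopA arr target (arr.length + 1) 0 ((arr.length : Int) - 1)

-- ===== PORT B =====
-- B's helper go(lo, n): a window of n elements starting at index lo, recursing
-- on the strictly smaller half-window length; since the top call keeps
-- lo + n ≤ arr.length, the index lo + k is always in range, so `getD _ 0` is
-- exactly Python's arr[lo + k] here.
def pvGoB (arr : List Int) (target : Int) (lo n : Nat) : Nat :=
  if n = 0 then lo
  else
    let k := (n - 1) / 2
    if arr.getD (lo + k) 0 ≥ target then pvGoB arr target lo k
    else pvGoB arr target (lo + k + 1) (n - k - 1)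
termination_by n
decreasing_by all_goals omega

def left_binary_search_alt (arr : List Int) (target : Int) : Int :=
  (pvGoB arr target 0 arr.length : Int)

-- ===== PRECONDITION & SPEC =====
def Spec_left_binary_search (arr : List Int) (target : Int) (out : Int) : Prop := out = left_binary_search_alt arr target
instance (arr : List Int) (target : Int) (out : Int) : Decidable (Spec_left_binary_search arr target out) := by unfold Spec_left_binary_search; infer_instance

-- ===== CLAIM (what is proved, stated in full; the proofs are below) =====
def Claim_equal_left_binary_search : Prop := ∀ (arr : List Int) (target : Int), Dom_left_binary_search arr target → Spec_left_binary_search arr target (left_binary_search arr target)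

-- ===== LEMMAS AND PROOFS =====

-- A's state (left, right) corresponds to B's window (lo, n) via left = lo,
-- right = lo + n - 1; the loop and the recursion agree at sufficient fuel.
theorem pvLoopA_eq_pvGoB (arr : List Int) (target : Int) (fuel lo n : Nat)
    (hlen : lo + n ≤ arr.length) (hfuel : n ≤ fuel) :
    pvLoopA arr target fuel (lo : Int) ((lo : Int) + (n : Int) - 1) = (pvGoB arr target lo n : Int) := by
  induction fuel generalizing lo n with
  | zero =>
    have hn : n = 0 := by omega
    subst hn
    rw [pvGoB]
    simp [pvLoopA]
  | succ fuel ih =>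
    rw [pvLoopA, pvGoB]
    by_cases hn : n = 0
    · subst hn
      rw [if_neg (by omega), if_pos rfl]
    · rw [if_pos (by omega), if_neg hn]
      have hk : PySem.Int.floordiv ((lo : Int) + ((lo : Int) + (n : Int) - 1)) 2
          = ((lo + (n - 1) / 2 : Nat) : Int) := by
        rw [PySem.Int.floordiv_eq_ediv_of_pos (show (0:Int) < 2 by norm_num)]
        push_cast [Nat.cast_sub (by omega : 1 ≤ n)]
        omega
      rw [hk]
      have hidx : lo + (n - 1) / 2 < arr.length := by omega
      rw [PySem.List.pyGet?_natCast, List.getElem?_eq_getElem hidx]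
      dsimp only
      have hgetD : arr.getD (lo + (n - 1) / 2) 0 = arr[lo + (n - 1) / 2] := by
        simp [List.getD, List.getElem?_eq_getElem hidx]
      rw [hgetD]
      by_cases hge : arr[lo + (n - 1) / 2] ≥ target
      · rw [if_pos hge, if_pos hge]
        have := ih lo ((n - 1) / 2) (by omega) (by omega)
        rw [← this]
        congr 1
      · rw [if_neg hge, if_neg hge]
        have := ih (lo + (n - 1) / 2 + 1) (n - (n - 1) / 2 - 1) (by omega) (by omega)
        rw [← this]
        congr 1 <;> push_cast <;> omega

-- ===== VERDICT (by name: the statement is the Claim_ definition above) =====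
theorem left_binary_search_spec : Claim_equal_left_binary_search := by
  intro arr target _
  unfold Spec_left_binary_search left_binary_search left_binary_search_alt
  have := pvLoopA_eq_pvGoB arr target (arr.length + 1) 0 arr.length (by omega) (by omega)
  simpa using this
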